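-- pv_equiv track=rewrite | github.com/juliafox8/cm-codes | Programming_a5/select_strings.py | select_strings_backward
-- ===== SOURCE A (Python) =====
-- def select_strings_backward(names, letter):
--     #base case
--     if names == []:
--         return []
--     last_name = names[-1]
--
--     if last_name == '':
--         return select_strings_backward(names[:-1], letter)
--
--     if last_name[-1] == letter:
--         return [last_name] + select_strings_backward(names[:-1], letter)
--
--     return select_strings_backward(names[:-1], letter)
-- ===== SOURCE B (Python) =====
-- def select_strings_backward(names, letter):
--     result = []
--     for name in names:
--         if name != '' and name[-1] == letter:
--             result = [name] + result
--     return result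
-- ===== Notes on version B (the rewrite author's own statement) =====
-- stated objective: faster
-- what changed: Replaces A's recursion that copies names[:-1] at every step (quadratic slicing, linear recursion depth) with a single forward loop over names that prepends each matching name to an accumulator, producing the same back-to-front order.
import Mathlib
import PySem

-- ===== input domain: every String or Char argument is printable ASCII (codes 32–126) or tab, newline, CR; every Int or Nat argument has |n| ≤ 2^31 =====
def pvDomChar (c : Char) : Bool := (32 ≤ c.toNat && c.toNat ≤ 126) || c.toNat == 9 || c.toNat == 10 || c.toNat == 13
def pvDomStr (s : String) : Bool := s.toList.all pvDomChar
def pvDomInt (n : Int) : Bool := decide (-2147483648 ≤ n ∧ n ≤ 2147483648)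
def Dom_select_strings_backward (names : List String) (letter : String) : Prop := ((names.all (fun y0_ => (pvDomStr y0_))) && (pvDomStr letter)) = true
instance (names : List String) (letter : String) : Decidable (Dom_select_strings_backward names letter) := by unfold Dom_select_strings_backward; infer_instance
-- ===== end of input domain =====

-- B replaces A's recursion on names[:-1] (which copies the list at every step) by one
-- forward loop with an accumulator that prepends each matching name; same return value.

-- ===== PORT A =====
-- A: if names == []: return []; last_name = names[-1]; recurse on names[:-1],
-- consing last_name when last_name != '' and last_name[-1] == letter.
def select_strings_backward (names : List String) (letter : String) : List String :=
  if h : names = [] then []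
  else
    -- names[-1]; in range because names ≠ [] (the default "" is never used)
    let last_name := PySem.List.pyGetD names (-1) ""
    if last_name = "" then
      select_strings_backward (PySem.List.slice names none (some (-1))) letter
    else
      -- last_name[-1] == letter : Python compares the one-char string to letter
      match PySem.Str.pyGet? last_name (-1) with
      | none => []   -- unreachable: last_name ≠ ''
      | some c =>
        if String.ofList [c] = letter then
          last_name :: select_strings_backward (PySem.List.slice names none (some (-1))) letter
        else
          select_strings_backward (PySem.List.slice names none (some (-1))) letter
termination_by names.length
decreasing_by
  all_goals
    simp [PySem.List.slice_to_neg_one]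
    exact List.length_pos_iff.mpr h

-- ===== PORT B =====
-- B: result = []; for name in names: if name != '' and name[-1] == letter: result = [name] + result
def select_strings_backward_alt (names : List String) (letter : String) : List String :=
  names.foldl (fun result name =>
    -- name != '' and name[-1] == letter  (pyGet? is none exactly when name = '')
    match PySem.Str.pyGet? name (-1) with
    | none => result
    | some c => if String.ofList [c] = letter then name :: result else result) []

-- ===== PRECONDITION & SPEC =====
def Spec_select_strings_backward (names : List String) (letter : String) (out : List String) : Prop := out = select_strings_backward_alt names letter
instance (names : List String) (letter : String) (out : List String) : Decidable (Spec_select_strings_backward names letter out) := by unfold Spec_select_strings_backward; infer_instance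

-- ===== CLAIM (what is proved, stated in full; the proofs are below) =====
def Claim_equal_select_strings_backward : Prop := ∀ (names : List String) (letter : String), Dom_select_strings_backward names letter → Spec_select_strings_backward names letter (select_strings_backward names letter)

-- ===== LEMMAS AND PROOFS =====

-- B's loop step
def pvStep (letter : String) (result : List String) (name : String) : List String :=
  match PySem.Str.pyGet? name (-1) with
  | none => result
  | some c => if String.ofList [c] = letter then name :: result else result

theorem alt_eq_foldl (names : List String) (letter : String) :
    select_strings_backward_alt names letter = names.foldl (pvStep letter) [] := rfl

-- foldl over a snoc
theorem foldl_snoc (letter : String) (xs : List String) (x : String) (init : List String) :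
    (xs ++ [x]).foldl (pvStep letter) init = pvStep letter (xs.foldl (pvStep letter) init) x := by
  simp

-- A on a snoc unfolds to one step of B applied to A of the prefix
theorem A_snoc (letter : String) (xs : List String) (x : String) :
    select_strings_backward (xs ++ [x]) letter
      = pvStep letter (select_strings_backward xs letter) x := by
  rw [select_strings_backward]
  have hne : xs ++ [x] ≠ [] := by simp
  simp only [hne, dite_false, PySem.List.pyGetD_neg_one_append_singleton,
    PySem.List.slice_to_neg_one, List.dropLast_concat]
  by_cases hx : x = ""
  · subst hx
    simp [pvStep, PySem.Str.pyGet?, PySem.List.pyGet?]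
  · simp only [hx, if_false]
    unfold pvStep
    cases hc : PySem.Str.pyGet? x (-1) with
    | none =>
      exfalso
      have : x.toList.getLast? = none := by
        simpa [PySem.Str.pyGet?, PySem.List.pyGet?_neg_one] using hc
      simp only [List.getLast?_eq_none_iff] at this
      exact hx (by cases x; simp_all)
    | some c =>
      by_cases hcl : String.ofList [c] = letter <;> simp [hcl]

theorem main (names : List String) (letter : String) :
    select_strings_backward names letter = select_strings_backward_alt names letter := by
  rw [alt_eq_foldl]
  induction names using List.reverseRecOn with
  | nil => rw [select_strings_backward]; simp
  | append_singleton xs x ih => rw [A_snoc, foldl_snoc, ih]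

-- ===== VERDICT (by name: the statement is the Claim_ definition above) =====
theorem select_strings_backward_spec : Claim_equal_select_strings_backward := by
  intro names letter _
  unfold Spec_select_strings_backward
  exact main names letter
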